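-- pv_equiv track=rewrite | github.com/aks1299/Programs | 2141019334/PIP_2141019334/Assignment6/q1.py | make2Star
-- ===== SOURCE A (Python) =====
-- def make2Star(str):
--     ss = ''
--     rs = ''
--     for i in str:
--         if(i == ss):
--             rs += "*"
--         else:
--             rs += i
--         ss = i
--     return rs
-- ===== SOURCE B (Python) =====
-- def make2Star(str):
--     # Run-based: split input into maximal runs of equal characters; keep each
--     # run's first character and emit '*' for the rest of the run.
--     out = []
--     i = 0
--     n = len(str)
--     while i < n:
--         j = i
--         while j < n and str[j] == str[i]:
--             j += 1
--         out.append(str[i] + '*' * (j - i - 1))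
--         i = j
--     return ''.join(out)
-- ===== Notes on version B (the rewrite author's own statement) =====
-- stated objective: alternative
-- what changed: Replaces the per-character previous-char state machine with a two-pointer run decomposition: each maximal run of equal characters is emitted as its first character followed by len(run)-1 asterisks, joined at the end.
import Mathlib
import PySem

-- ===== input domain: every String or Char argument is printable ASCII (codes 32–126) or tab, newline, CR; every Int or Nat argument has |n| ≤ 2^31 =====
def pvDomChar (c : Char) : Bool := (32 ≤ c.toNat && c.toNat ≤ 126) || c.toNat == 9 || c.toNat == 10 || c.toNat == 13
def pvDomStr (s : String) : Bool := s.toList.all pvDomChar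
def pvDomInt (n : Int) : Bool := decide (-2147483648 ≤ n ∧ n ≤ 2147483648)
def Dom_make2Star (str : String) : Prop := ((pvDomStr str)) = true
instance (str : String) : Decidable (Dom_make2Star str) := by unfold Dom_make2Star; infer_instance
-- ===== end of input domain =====

-- B replaces A's previous-char state machine with a run-based two-pointer decomposition (objective: alternative, same cost).

-- ===== PORT A =====
-- A tracks the previous character (initially '' in Python, which no single char equals → Option Char none)
-- and appends '*' or the character itself, one step per character.
def make2Star (str : String) : String :=
  String.ofList (str.toList.foldl
    (fun (st : Option Char × List Char) i =>
      (some i, if some i = st.1 then st.2 ++ ['*'] else st.2 ++ [i]))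
    (none, [])).2

-- ===== PORT B =====
-- Transliteration of Source B's outer while loop: consume the maximal run starting at the head
-- (inner scan while chars equal the run's first char), emit head + '*'*(run-1), recurse on the rest.
def make2StarRuns (l : List Char) : List Char :=
  match l with
  | [] => []
  | c :: rest =>
      (c :: List.replicate (rest.takeWhile (fun x => x == c)).length '*')
        ++ make2StarRuns (rest.dropWhile (fun x => x == c))
  termination_by l.length
  decreasing_by
    simp only [List.length_cons]
    exact Nat.lt_succ_of_le (List.length_dropWhile_le _ _)

def make2Star_alt (str : String) : String :=
  String.ofList (make2StarRuns str.toList)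

-- ===== PRECONDITION & SPEC =====
def Spec_make2Star (str : String) (out : String) : Prop := out = make2Star_alt str
instance (str : String) (out : String) : Decidable (Spec_make2Star str out) := by unfold Spec_make2Star; infer_instance

-- ===== CLAIM (what is proved, stated in full; the proofs are below) =====
def Claim_equal_make2Star : Prop := ∀ (str : String), Dom_make2Star str → Spec_make2Star str (make2Star str)

-- ===== LEMMAS AND PROOFS =====

-- Functional description of A's loop body output (without the accumulator).
def starSeq (prev : Option Char) (l : List Char) : List Char :=
  match l with
  | [] => []
  | i :: t => (if some i = prev then '*' else i) :: starSeq (some i) t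

theorem foldl_starSeq (l : List Char) (prev : Option Char) (acc : List Char) :
    (l.foldl
      (fun (st : Option Char × List Char) i =>
        (some i, if some i = st.1 then st.2 ++ ['*'] else st.2 ++ [i]))
      (prev, acc)).2 = acc ++ starSeq prev l := by
  induction l generalizing prev acc with
  | nil => simp [starSeq]
  | cons i t ih =>
      simp only [List.foldl_cons, starSeq]
      by_cases h : some i = prev
      · simp [h, ih, List.append_assoc]
      · simp [h, ih, List.append_assoc]

theorem starSeq_eq_runs (n : ℕ) (l : List Char) (hl : l.length ≤ n) :
    starSeq none l = make2StarRuns l ∧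
    ∀ c : Char, starSeq (some c) l =
      List.replicate (l.takeWhile (fun x => x == c)).length '*'
        ++ make2StarRuns (l.dropWhile (fun x => x == c)) := by
  induction n generalizing l with
  | zero =>
      have : l = [] := List.length_eq_zero_iff.mp (Nat.le_zero.mp hl)
      subst this; simp [starSeq, make2StarRuns]
  | succ n ih =>
      cases l with
      | nil => simp [starSeq, make2StarRuns]
      | cons d t =>
          have ht : t.length ≤ n := by
            simpa [Nat.succ_le_succ_iff] using hl
          have iht := ih t ht
          constructor
          · -- prev = none: head differs from '' always
            simp only [starSeq, make2StarRuns]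
            have := iht.2 d
            simp [this]
          · intro c
            by_cases hdc : d = c
            · subst hdc
              simp only [starSeq, List.takeWhile, List.dropWhile, beq_self_eq_true,
                if_pos rfl, cond_true]
              have := iht.2 d
              simp [this, List.replicate_succ]
            · have hbeq : (d == c) = false := by simp [hdc]
              simp only [starSeq, List.takeWhile, List.dropWhile, hbeq]
              have hne : some d = some c ↔ False := by simp [hdc]
              simp only [hne, if_false]
              simp only [make2StarRuns]
              have := iht.2 d
              simp [this]

-- ===== VERDICT (by name: the statement is the Claim_ definition above) =====
theorem make2Star_spec : Claim_equal_make2Star := by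
  intro str _
  unfold Spec_make2Star make2Star make2Star_alt
  rw [foldl_starSeq]
  rw [(starSeq_eq_runs str.toList.length str.toList le_rfl).1]
  simp
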